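-- pv_equiv track=rewrite | github.com/Eliot-Abramo/Kicad-Space-Reliability | plugins/ecss_fields.py | get_ordered_categories_present
-- ===== SOURCE A (Python) =====
-- from typing import Dict, Any, List
--
-- CATEGORY_DISPLAY_ORDER = [
--     "ic_digital", "ic_analog", "fpga",
--     "resistor",
--     "capacitor_ceramic", "capacitor_tantalum",
--     "diode", "bjt", "mosfet",
--     "inductor", "connector", "converter",
--     "crystal", "relay", "battery",
--     "optocoupler", "thyristor", "pcb_solder", "miscellaneous",
-- ]
--
-- def get_ordered_categories_present(category_set: set) -> List[str]:
--     """Return categories from category_set in canonical UI display order."""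
--     ordered = []
--     for key in CATEGORY_DISPLAY_ORDER:
--         if key in category_set:
--             ordered.append(key)
--     # Add any remaining not in canonical order
--     for key in sorted(category_set):
--         if key not in ordered:
--             ordered.append(key)
--     return ordered
-- ===== SOURCE B (Python) =====
-- from typing import List
--
-- CATEGORY_DISPLAY_ORDER = [
--     "ic_digital", "ic_analog", "fpga",
--     "resistor",
--     "capacitor_ceramic", "capacitor_tantalum",
--     "diode", "bjt", "mosfet",
--     "inductor", "connector", "converter",
--     "crystal", "relay", "battery",
--     "optocoupler", "thyristor", "pcb_solder", "miscellaneous",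
-- ]
--
-- _ORDER_INDEX = {key: i for i, key in enumerate(CATEGORY_DISPLAY_ORDER)}
--
-- def get_ordered_categories_present(category_set: set) -> List[str]:
--     """Return categories from category_set in canonical UI display order."""
--     n = len(CATEGORY_DISPLAY_ORDER)
--     return sorted(category_set, key=lambda k: (_ORDER_INDEX.get(k, n), k))
-- ===== Notes on version B (the rewrite author's own statement) =====
-- stated objective: faster
-- what changed: Replaces A's two scanning passes (append canonical keys present, then append sorted leftovers) with a single sorted() call over the set using a precomputed canonical-index dict as key (index, name), giving non-canonical keys the max rank.
import Mathlib
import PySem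

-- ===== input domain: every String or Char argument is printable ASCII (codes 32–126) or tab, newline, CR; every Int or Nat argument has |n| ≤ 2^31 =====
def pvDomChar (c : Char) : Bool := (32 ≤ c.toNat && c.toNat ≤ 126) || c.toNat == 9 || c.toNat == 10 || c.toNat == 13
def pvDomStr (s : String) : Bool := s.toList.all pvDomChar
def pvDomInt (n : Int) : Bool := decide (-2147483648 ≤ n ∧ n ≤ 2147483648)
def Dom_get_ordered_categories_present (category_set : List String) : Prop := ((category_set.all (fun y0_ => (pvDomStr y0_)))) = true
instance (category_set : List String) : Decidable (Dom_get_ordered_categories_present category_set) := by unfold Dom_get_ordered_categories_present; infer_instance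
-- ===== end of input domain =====

-- B replaces A's two passes (canonical scan + sorted-remainder scan with a 'not in ordered'
-- list scan per element) by ONE sort under a precomputed (index, name) key; objective: faster
-- (measured). Equal on every duplicate-free (i.e. genuine set) input.

-- CATEGORY_DISPLAY_ORDER (shared module constant)
def pvCanon : List String := [
  "ic_digital", "ic_analog", "fpga",
  "resistor",
  "capacitor_ceramic", "capacitor_tantalum",
  "diode", "bjt", "mosfet",
  "inductor", "connector", "converter",
  "crystal", "relay", "battery",
  "optocoupler", "thyristor", "pcb_solder", "miscellaneous"]

-- ===== PORT A =====
def get_ordered_categories_present (category_set : List String) : List String :=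
  let ordered := pvCanon.foldl
    (fun acc key => if category_set.contains key then acc ++ [key] else acc) []
  (PySem.List.sorted category_set (fun x => x)).foldl
    (fun acc key => if acc.contains key then acc else acc ++ [key]) ordered

-- ===== PORT B =====
-- _ORDER_INDEX = {key: i for i, key in enumerate(CATEGORY_DISPLAY_ORDER)}
def pvOrderIndex : PySem.Dict String Int :=
  (PySem.List.enumerate pvCanon 0).foldl (fun d p => d.insert p.2 p.1) PySem.Dict.empty

def get_ordered_categories_present_alt (category_set : List String) : List String :=
  PySem.List.sorted2 category_set
    (fun k => pvOrderIndex.getD k (PySem.List.len pvCanon)) (fun k => k)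

-- ===== PRECONDITION & SPEC =====
-- Pre_ excludes lists with duplicate elements: the Python parameter is a set, which a
-- duplicate-carrying list does not represent (on such lists A dedups and B does not).
def Pre_get_ordered_categories_present (category_set : List String) : Prop :=
  category_set.Nodup
instance (category_set : List String) : Decidable (Pre_get_ordered_categories_present category_set) := by unfold Pre_get_ordered_categories_present; infer_instance

def pvWitness_get_ordered_categories_present : List String :=
  ["resistor", "zeta", "fpga", "alpha"]

def Spec_get_ordered_categories_present (category_set : List String) (out : List String) : Prop := out = get_ordered_categories_present_alt category_set
instance (category_set : List String) (out : List String) : Decidable (Spec_get_ordered_categories_present category_set out) := by unfold Spec_get_ordered_categories_present; infer_instance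

-- ===== CLAIM (what is proved, stated in full; the proofs are below) =====
def Claim_equal_get_ordered_categories_present : Prop := ∀ (category_set : List String), Dom_get_ordered_categories_present category_set → Pre_get_ordered_categories_present category_set → Spec_get_ordered_categories_present category_set (get_ordered_categories_present category_set)

-- ===== LEMMAS AND PROOFS =====

-- the rank B's sort key computes through the index dictionary
def pvRank (k : String) : Int := pvOrderIndex.getD k (PySem.List.len pvCanon)

lemma pvRank_of_not_mem (k : String) (h : k ∉ pvCanon) : pvRank k = 19 := by
  simp [pvCanon] at h
  obtain ⟨h1,h2,h3,h4,h5,h6,h7,h8,h9,h10,h11,h12,h13,h14,h15,h16,h17,h18,h19⟩ := h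
  simp [pvRank, pvOrderIndex, pvCanon, PySem.List.enumerate, PySem.List.len,
        PySem.Dict.getD_insert, PySem.Dict.getD_empty,
        h1,h2,h3,h4,h5,h6,h7,h8,h9,h10,h11,h12,h13,h14,h15,h16,h17,h18,h19]

lemma pvRank_lt_of_mem : ∀ a ∈ pvCanon, pvRank a < 19 := by decide

lemma pvCanon_pairwise_rank : pvCanon.Pairwise (fun a b => pvRank a < pvRank b) := by decide

lemma pvCanon_nodup : pvCanon.Nodup := by decide

-- sorted2 with key (k1 x, x) is sorted under the lexicographic key
lemma pv_sorted2_eq_sorted_toLex (xs : List String) (k1 : String → Int) :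
    PySem.List.sorted2 xs k1 (fun x => x) =
      PySem.List.sorted xs (fun x => toLex (k1 x, x)) := by
  simp only [PySem.List.sorted2, PySem.List.sorted, if_neg (by decide : ¬(false = true))]
  have hbe : (fun a b => decide (k1 a < k1 b) || (!decide (k1 b < k1 a) && decide (a < b)))
      = (fun a b : String => decide (toLex (k1 a, a) < toLex (k1 b, b))) := by
    funext a b
    rw [Bool.eq_iff_iff]
    simp only [Bool.or_eq_true, Bool.and_eq_true, Bool.not_eq_true', decide_eq_true_iff,
      decide_eq_false_iff_not, Prod.Lex.lt_iff, ofLex_toLex]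
    constructor
    · rintro (h | ⟨hnl, hab⟩)
      · exact Or.inl h
      · rcases lt_trichotomy (k1 a) (k1 b) with h | h | h
        · exact Or.inl h
        · exact Or.inr ⟨h, hab⟩
        · exact absurd h hnl
    · rintro (h | ⟨he, hab⟩)
      · exact Or.inl h
      · exact Or.inr ⟨fun hlt => by rw [he] at hlt; exact lt_irrefl _ hlt, hab⟩
  rw [hbe]

-- A's second loop over a duplicate-free list is append-the-unseen = a filter
lemma pv_dedup_loop (l : List String) (acc : List String) (h : l.Nodup) :
    l.foldl (fun acc k => if acc.contains k then acc else acc ++ [k]) acc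
      = acc ++ l.filter (fun k => !acc.contains k) := by
  induction l generalizing acc with
  | nil => simp
  | cons x t ih =>
    rcases List.nodup_cons.mp h with ⟨hx, ht⟩
    by_cases hc : acc.contains x
    · simp only [List.foldl_cons, List.filter_cons, hc, if_true, Bool.not_true,
        Bool.false_eq_true, if_false]
      simpa using ih acc ht
    · simp only [List.foldl_cons, List.filter_cons, hc, Bool.not_false, if_true,
        Bool.false_eq_true, if_false]
      rw [ih (acc ++ [x]) ht]
      simp only [List.append_assoc, List.cons_append, List.nil_append,
        List.append_cancel_left_eq, List.cons.injEq, true_and]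
      apply List.filter_congr
      intro y hy
      have hyx : y ≠ x := fun he => hx (he ▸ hy)
      simp [List.contains_eq_mem, hyx]

theorem get_ordered_categories_present_spec_aux (s : List String)
    (hs : s.Nodup) :
    get_ordered_categories_present s = get_ordered_categories_present_alt s := by
  -- names for the two halves of A's result
  set first : List String := pvCanon.filter (fun k => s.contains k) with hfirst_def
  have hss_nodup : (PySem.List.sorted s (fun x => x)).Nodup :=
    ((PySem.List.sorted_perm s (fun x => x) false).nodup_iff).mpr hs
  set second : List String :=
    (PySem.List.sorted s (fun x => x)).filter (fun k => !first.contains k) with hsecond_def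
  -- A computes first ++ second
  have hA : get_ordered_categories_present s = first ++ second := by
    unfold get_ordered_categories_present
    rw [PySem.List.foldl_append_if_eq_filter, List.nil_append]
    exact pv_dedup_loop _ _ hss_nodup
  -- membership facts
  have hmem_first : ∀ {x}, x ∈ first → x ∈ pvCanon ∧ x ∈ s := by
    intro x hx
    rcases List.mem_filter.mp hx with ⟨h1, h2⟩
    exact ⟨h1, by simpa [List.contains_eq_mem] using h2⟩
  have hmem_second : ∀ {x}, x ∈ second → x ∈ s ∧ x ∉ pvCanon := by
    intro x hx
    rcases List.mem_filter.mp hx with ⟨h1, h2⟩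
    have hxs : x ∈ s := (PySem.List.mem_sorted _ _ _ _).mp h1
    refine ⟨hxs, fun hxc => ?_⟩
    have : x ∈ first := List.mem_filter.mpr ⟨hxc, by simpa [List.contains_eq_mem] using hxs⟩
    simp [List.contains_eq_mem, this] at h2
  -- B is the sort of s under the lexicographic (rank, name) key
  have hB : get_ordered_categories_present_alt s
      = PySem.List.sorted s (fun x => toLex (pvRank x, x)) := by
    unfold get_ordered_categories_present_alt
    exact pv_sorted2_eq_sorted_toLex s pvRank
  rw [hA, hB]
  symm
  apply PySem.List.sorted_eq_of_perm_of_pairwise_lt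
  · -- (first ++ second).Perm s
    have hnd : (first ++ second).Nodup := by
      rw [List.nodup_append]
      refine ⟨pvCanon_nodup.filter _, hss_nodup.filter _, ?_⟩
      intro a ha b hb hab
      exact (hmem_second hb).2 (hab ▸ (hmem_first ha).1)
    rw [List.perm_ext_iff_of_nodup hnd hs]
    intro a
    constructor
    · intro ha
      rcases List.mem_append.mp ha with h | h
      · exact (hmem_first h).2
      · exact (hmem_second h).1
    · intro ha
      by_cases hc : a ∈ pvCanon
      · exact List.mem_append.mpr (Or.inl
          (List.mem_filter.mpr ⟨hc, by simpa [List.contains_eq_mem] using ha⟩))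
      · refine List.mem_append.mpr (Or.inr (List.mem_filter.mpr
          ⟨(PySem.List.mem_sorted _ _ _ _).mpr ha, ?_⟩))
        have : a ∉ first := fun hf => hc (hmem_first hf).1
        simpa [List.contains_eq_mem] using this
  · -- strictly increasing under the lexicographic key
    rw [List.pairwise_append]
    refine ⟨?_, ?_, ?_⟩
    · refine (pvCanon_pairwise_rank.filter _).imp ?_
      intro a b h
      exact Prod.Lex.lt_iff.mpr (Or.inl (by simpa using h))
    · have hle : (PySem.List.sorted s (fun x => x)).Pairwise (fun a b => a ≤ b) := by
        simpa using PySem.List.sorted_pairwise s (fun x => x)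
      have hlt : second.Pairwise (fun a b : String => a < b) := by
        have := (hle.and hss_nodup).filter (fun k => !first.contains k)
        exact this.imp (fun h => lt_of_le_of_ne h.1 h.2)
      refine hlt.imp_of_mem ?_
      intro a b ha hb h
      have h19a := pvRank_of_not_mem a (hmem_second ha).2
      have h19b := pvRank_of_not_mem b (hmem_second hb).2
      exact Prod.Lex.lt_iff.mpr (Or.inr ⟨by simp [h19a, h19b], h⟩)
    · intro a ha b hb
      have h19b := pvRank_of_not_mem b (hmem_second hb).2
      have hlt := pvRank_lt_of_mem a (hmem_first ha).1
      exact Prod.Lex.lt_iff.mpr (Or.inl (by simpa [h19b] using hlt))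

-- ===== VERDICT (by name: the statement is the Claim_ definition above) =====
theorem get_ordered_categories_present_spec : Claim_equal_get_ordered_categories_present := by
  intro s _ hpre
  exact get_ordered_categories_present_spec_aux s hpre
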